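-- pv_equiv track=rewrite | github.com/ixtel/itools | src/rewr/mysql_read.py | _result_prepare_csv
-- ===== SOURCE A (Python) =====
-- def _result_prepare_csv(header, header_result, enabled, table):
-- 	"""
-- 	:param header:
-- 	:param header_result:
-- 	:param enabled:
-- 	:param table:
-- 	:return:
-- 	"""
-- 	result_table = [header_result]
-- 	for _row in table:
-- 		result_row = []
-- 		for i, _col in enumerate(header):
-- 			if enabled[i]:
-- 				result_row.append(_row[i])
-- 		result_table.append(result_row)
-- 	return result_table
-- ===== SOURCE B (Python) =====
-- def _result_prepare_csv(header, header_result, enabled, table):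
-- 	cols = [[_row[i] for _row in table]
-- 	        for i, (_h, e) in enumerate(zip(header, enabled)) if e]
-- 	return [header_result] + [[col[j] for col in cols] for j in range(len(table))]
-- ===== Notes on version B (the rewrite author's own statement) =====
-- stated objective: alternative
-- what changed: B works column-wise: it first extracts each enabled column of the table as a whole (gathering down the rows, driven by zip(header, enabled)), then transposes the selected columns back into rows; A filters cell-by-cell inside a per-row loop.
import Mathlib
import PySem

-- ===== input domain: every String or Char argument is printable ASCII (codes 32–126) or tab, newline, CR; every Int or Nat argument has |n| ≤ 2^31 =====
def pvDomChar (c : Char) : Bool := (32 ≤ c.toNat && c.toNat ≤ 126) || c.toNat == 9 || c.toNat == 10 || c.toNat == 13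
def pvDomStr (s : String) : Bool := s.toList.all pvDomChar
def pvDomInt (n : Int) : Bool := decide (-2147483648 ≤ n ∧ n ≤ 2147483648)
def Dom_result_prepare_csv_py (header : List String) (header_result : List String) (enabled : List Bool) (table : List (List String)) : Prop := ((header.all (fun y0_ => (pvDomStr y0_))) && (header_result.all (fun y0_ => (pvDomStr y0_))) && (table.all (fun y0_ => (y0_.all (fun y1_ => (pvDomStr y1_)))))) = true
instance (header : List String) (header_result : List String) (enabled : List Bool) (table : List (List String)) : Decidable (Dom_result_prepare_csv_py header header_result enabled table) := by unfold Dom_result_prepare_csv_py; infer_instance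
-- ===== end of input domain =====

-- B is column-wise: it extracts each enabled column whole, then transposes the selected
-- columns back into rows; A filters cell-by-cell inside a per-row loop (objective: alternative).

-- ===== PORT A =====
-- 'for _row in table: for i, _col in enumerate(header): if enabled[i]: result_row.append(_row[i])';
-- Pre_ guarantees every getD index is in range, so getD is exact there.
def result_prepare_csv_py (header : List String) (header_result : List String) (enabled : List Bool) (table : List (List String)) : List (List String) :=
  table.foldl
    (fun result_table _row =>
      result_table ++
        [(List.range header.length).foldl
          (fun result_row i =>
            if enabled.getD i false then result_row ++ [_row.getD i ""] else result_row)
          []])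
    [header_result]

-- ===== PORT B =====
-- cols = [[_row[i] for _row in table] for i, (_h, e) in enumerate(zip(header, enabled)) if e]
-- return [header_result] + [[col[j] for col in cols] for j in range(len(table))]
def result_prepare_csv_py_alt (header : List String) (header_result : List String) (enabled : List Bool) (table : List (List String)) : List (List String) :=
  let cols := (PySem.List.enumerate (header.zip enabled)).filterMap
    (fun p => if p.2.2 then some (table.map (fun _row => PySem.List.pyGetD _row p.1 "")) else none)
  [header_result] ++ (PySem.List.pyRange 0 table.length 1).map
    (fun j => cols.map (fun col => PySem.List.pyGetD col j ""))

-- ===== PRECONDITION & SPEC =====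
-- Pre_ admits exactly the inputs on which Python A returns normally: either the table is
-- empty (the loops never index anything), or enabled covers every header position and each
-- table row has every enabled index in range; everywhere else A raises IndexError.
def Pre_result_prepare_csv_py (header : List String) (header_result : List String) (enabled : List Bool) (table : List (List String)) : Prop :=
  table = [] ∨
  (header.length ≤ enabled.length ∧
   ∀ _row ∈ table, ∀ i < header.length, enabled.getD i false = true → i < _row.length)
instance (header : List String) (header_result : List String) (enabled : List Bool) (table : List (List String)) : Decidable (Pre_result_prepare_csv_py header header_result enabled table) := by unfold Pre_result_prepare_csv_py; infer_instance

def pvWitness_result_prepare_csv_py : List String × List String × List Bool × List (List String) :=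
  (["a", "b"], ["A"], [true, false], [["1", "2"], ["3", "4"]])

def Spec_result_prepare_csv_py (header : List String) (header_result : List String) (enabled : List Bool) (table : List (List String)) (out : List (List String)) : Prop := out = result_prepare_csv_py_alt header header_result enabled table
instance (header : List String) (header_result : List String) (enabled : List Bool) (table : List (List String)) (out : List (List String)) : Decidable (Spec_result_prepare_csv_py header header_result enabled table out) := by unfold Spec_result_prepare_csv_py; infer_instance

-- ===== CLAIM (what is proved, stated in full; the proofs are below) =====
def Claim_equal_result_prepare_csv_py : Prop := ∀ (header : List String) (header_result : List String) (enabled : List Bool) (table : List (List String)), Dom_result_prepare_csv_py header header_result enabled table → Pre_result_prepare_csv_py header header_result enabled table → Spec_result_prepare_csv_py header header_result enabled table (result_prepare_csv_py header header_result enabled table)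

-- ===== LEMMAS AND PROOFS =====

theorem pv_filterMap_if {α β : Type} (l : List α) (p : α → Bool) (f : α → β) :
    l.filterMap (fun x => if p x then some (f x) else none) = (l.filter p).map f := by
  induction l with
  | nil => rfl
  | cons x xs ih => by_cases h : p x <;> simp [h, ih]

-- ===== VERDICT (by name: the statement is the Claim_ definition above) =====
theorem result_prepare_csv_py_spec : Claim_equal_result_prepare_csv_py := by
  intro header header_result enabled table _ hpre
  unfold Spec_result_prepare_csv_py result_prepare_csv_py result_prepare_csv_py_alt
  rw [PySem.List.foldl_append_singleton_eq_map]
  rcases hpre with rfl | ⟨hlen, hrows⟩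
  · simp [PySem.List.pyRange_one_eq_nil]
  · congr 1
    -- A side rows into filtered-index gathers
    have hA : ∀ _row : List String,
        (List.range header.length).foldl
          (fun result_row i =>
            if enabled.getD i false then result_row ++ [_row.getD i ""] else result_row) []
        = ((List.range header.length).filter (fun i => enabled.getD i false)).map
            (fun i => _row.getD i "") := by
      intro _row
      rw [PySem.List.foldl_append_if]
      simp
    -- B's cols in the same shape
    have hzlen : PySem.List.len (header.zip enabled) = (header.length : Int) := by
      simp [List.length_zip]; omega
    have hcols :
        (PySem.List.enumerate (header.zip enabled)).filterMap
          (fun p => if p.2.2 then some (table.map (fun _row => PySem.List.pyGetD _row p.1 "")) else none)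
        = ((List.range header.length).filter (fun i => enabled.getD i false)).map
            (fun i => table.map (fun _row => _row.getD i "")) := by
      rw [PySem.List.enumerate_eq_map_pyRange (header.zip enabled) ("", false), hzlen,
          PySem.List.pyRange_zero_natCast, List.filterMap_map, List.filterMap_map]
      rw [← pv_filterMap_if]
      apply List.filterMap_congr
      intro k hk
      have hk' : k < header.length := List.mem_range.mp hk
      have hkz : k < (header.zip enabled).length := by simp [List.length_zip]; omega
      simp [List.getElem?_eq_getElem hkz, List.getElem?_eq_getElem (show k < enabled.length by omega),
            List.getElem_zip]
    rw [hcols, PySem.List.pyRange_zero_natCast, List.map_map]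
    apply List.ext_getElem
    · simp
    · intro j h1 h2
      simp only [List.getElem_map, List.getElem_range, Function.comp, List.map_map]
      rw [hA]
      apply List.map_congr_left
      intro i _
      have hj : j < table.length := by simpa using h1
      simp [List.getElem?_eq_getElem hj]
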